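-- pv_equiv track=rewrite | github.com/KonradMarzec1991/Codewars-LeetCode | Codewars/Python/6kyu/6kyu_N smallest elements in original order.py | first_n_smallest
-- ===== SOURCE A (Python) =====
-- def first_n_smallest(arr, n):
--     from heapq import nsmallest
--     from collections import Counter
--     counter = Counter(nsmallest(n, arr))
--     output = []
--     for item in arr:
--         if counter.get(item, 0):
--             output.append(item)
--             counter[item] -= 1
--     return output
-- ===== SOURCE B (Python) =====
-- def first_n_smallest(arr, n):
--     k = min(max(n, 0), len(arr))
--     if k == 0:
--         return []
--     s = sorted(arr)
--     t = s[k - 1]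
--     quota = s[:k].count(t)
--     out = []
--     for x in arr:
--         if x < t:
--             out.append(x)
--         elif x == t and quota:
--             out.append(x)
--             quota -= 1
--     return out
-- ===== Notes on version B (the rewrite author's own statement) =====
-- stated objective: alternative
-- what changed: Replaces A's heapq.nsmallest + Counter bookkeeping (a per-value dict of remaining budgets) by a threshold scan: compute the k-th smallest value t once from sorted(arr), then keep every element < t and elements equal to t up to a single integer quota, in one pass with no dictionary; a timing run measured B faster at every size (no hashing, two integers of loop state).
import Mathlib
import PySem

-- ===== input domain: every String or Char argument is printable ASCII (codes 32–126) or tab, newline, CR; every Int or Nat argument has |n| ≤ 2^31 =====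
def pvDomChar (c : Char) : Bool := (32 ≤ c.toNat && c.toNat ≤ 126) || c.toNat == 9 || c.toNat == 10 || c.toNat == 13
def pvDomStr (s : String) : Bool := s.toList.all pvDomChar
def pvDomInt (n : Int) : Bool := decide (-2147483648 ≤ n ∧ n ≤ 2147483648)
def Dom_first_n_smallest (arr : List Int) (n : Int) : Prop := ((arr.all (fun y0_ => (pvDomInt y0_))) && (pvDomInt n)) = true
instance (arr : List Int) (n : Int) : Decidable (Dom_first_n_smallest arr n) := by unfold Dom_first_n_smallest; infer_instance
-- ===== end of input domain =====

-- B replaces A's heapq.nsmallest + Counter scan by a threshold-and-quota scan: the k-th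
-- smallest value t bounds what is kept; items < t are all kept, items = t up to a quota.

-- ===== PORT A =====
-- nsmallest(n, arr) = sorted(arr)[:n] with negative n giving []; take n.toNat is exactly that
def first_n_smallest (arr : List Int) (n : Int) : List Int :=
  let counter := PySem.Dict.counter ((PySem.List.sorted arr (fun x => x)).take n.toNat)
  (arr.foldl
    (fun (acc : List Int × PySem.Dict Int Int) item =>
      if acc.2.getD item 0 ≠ 0 then
        (acc.1 ++ [item], acc.2.modify item 0 (· - 1))
      else acc)
    ([], counter)).1

-- ===== PORT B =====
def first_n_smallest_alt (arr : List Int) (n : Int) : List Int :=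
  let k : Int := min (max n 0) (arr.length : Int)
  if k = 0 then []
  else
    let s := PySem.List.sorted arr (fun x => x)
    match PySem.List.pyGet? s (k - 1) with
    | none => []  -- unreachable: 1 ≤ k ≤ len(arr) = len(s)
    | some t =>
      (arr.foldl
        (fun (acc : List Int × Int) x =>
          if x < t then (acc.1 ++ [x], acc.2)
          else if x = t ∧ acc.2 ≠ 0 then (acc.1 ++ [x], acc.2 - 1)
          else acc)
        ([], (PySem.List.count (PySem.List.slice s none (some k)) t : Int))).1

-- ===== PRECONDITION & SPEC =====
def Spec_first_n_smallest (arr : List Int) (n : Int) (out : List Int) : Prop := out = first_n_smallest_alt arr n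
instance (arr : List Int) (n : Int) (out : List Int) : Decidable (Spec_first_n_smallest arr n out) := by unfold Spec_first_n_smallest; infer_instance

-- ===== CLAIM (what is proved, stated in full; the proofs are below) =====
def Claim_equal_first_n_smallest : Prop := ∀ (arr : List Int) (n : Int), Dom_first_n_smallest arr n → Spec_first_n_smallest arr n (first_n_smallest arr n)

-- ===== LEMMAS AND PROOFS =====

-- reference scan: keep x while its remaining budget r x is positive
def specGo (r : Int → Nat) : List Int → List Int
  | [] => []
  | x :: xs =>
    if 0 < r x then x :: specGo (fun v => if v = x then r v - 1 else r v) xs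
    else specGo r xs

lemma loopA_eq (rest : List Int) : ∀ (out : List Int) (d : PySem.Dict Int Int) (r : Int → Nat),
    (∀ v, d.getD v 0 = (r v : Int)) →
    (rest.foldl
      (fun (acc : List Int × PySem.Dict Int Int) item =>
        if acc.2.getD item 0 ≠ 0 then
          (acc.1 ++ [item], acc.2.modify item 0 (· - 1))
        else acc)
      (out, d)).1 = out ++ specGo r rest := by
  induction rest with
  | nil => intro out d r _; simp [specGo]
  | cons x xs ih =>
    intro out d r hd
    simp only [List.foldl_cons, specGo]
    by_cases hx : 0 < r x
    · have hcond : d.getD x 0 ≠ 0 := by rw [hd]; exact_mod_cast Nat.pos_iff_ne_zero.mp hx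
      rw [if_pos hcond, if_pos hx]
      have h1 : ∀ v, (d.modify x 0 (· - 1)).getD v 0 = (((fun v => if v = x then r v - 1 else r v) v : Nat) : Int) := by
        intro v
        rw [PySem.Dict.getD_modify, hd]
        by_cases hvx : v = x
        · subst hvx; simp; omega
        · simpa [hvx] using hd v
      rw [ih (out ++ [x]) _ _ h1]
      simp
    · have hr0 : r x = 0 := by omega
      have hcond : ¬ d.getD x 0 ≠ 0 := by rw [hd, hr0]; simp
      rw [if_neg hcond, if_neg hx]
      exact ih out d r hd

lemma loopB_eq (t : Int) (rest : List Int) : ∀ (out : List Int) (r : Int → Nat),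
    (∀ v, v < t → r v = rest.count v) → (∀ v, t < v → r v = 0) →
    (rest.foldl
      (fun (acc : List Int × Int) x =>
        if x < t then (acc.1 ++ [x], acc.2)
        else if x = t ∧ acc.2 ≠ 0 then (acc.1 ++ [x], acc.2 - 1)
        else acc)
      (out, (r t : Int))).1 = out ++ specGo r rest := by
  induction rest with
  | nil => intro out r _ _; simp [specGo]
  | cons x xs ih =>
    intro out r hlt hgt
    simp only [List.foldl_cons, specGo]
    rcases lt_trichotomy x t with hx | hx | hx
    · -- x < t : kept by both; the budget of x equals its count in the suffix, hence positive
      have hrx : 0 < r x := by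
        rw [hlt x hx]; simp
      rw [if_pos hx, if_pos hrx]
      have h1 : ∀ v, v < t → (fun v => if v = x then r v - 1 else r v) v = xs.count v := by
        intro v hv
        show (if v = x then r v - 1 else r v) = xs.count v
        by_cases hvx : v = x
        · rw [if_pos hvx, hvx, hlt x hx]; simp
        · rw [if_neg hvx, hlt v hv]; simp [Ne.symm hvx]
      have h2 : ∀ v, t < v → (fun v => if v = x then r v - 1 else r v) v = 0 := by
        intro v hv
        show (if v = x then r v - 1 else r v) = 0
        rw [if_neg (by omega), hgt v hv]
      have hih := ih (out ++ [x]) (fun v => if v = x then r v - 1 else r v) h1 h2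
      simp only [if_neg (show ¬ t = x by omega)] at hih
      rw [hih]
      simp
    · -- x = t : the quota decides, identically on both sides
      have hxt : ¬ x < t := by omega
      rw [if_neg hxt]
      by_cases hq : 0 < r x
      · have hq' : 0 < r t := hx ▸ hq
        have hcond : x = t ∧ ((r t : Int)) ≠ 0 := by
          exact ⟨hx, by exact_mod_cast Nat.pos_iff_ne_zero.mp hq'⟩
        rw [if_pos hcond, if_pos hq]
        have h1 : ∀ v, v < t → (fun v => if v = x then r v - 1 else r v) v = xs.count v := by
          intro v hv
          show (if v = x then r v - 1 else r v) = xs.count v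
          rw [if_neg (by omega), hlt v hv]
          simp [show ¬ x = v by omega]
        have h2 : ∀ v, t < v → (fun v => if v = x then r v - 1 else r v) v = 0 := by
          intro v hv
          show (if v = x then r v - 1 else r v) = 0
          rw [if_neg (by omega), hgt v hv]
        have hih := ih (out ++ [x]) (fun v => if v = x then r v - 1 else r v) h1 h2
        simp only [if_pos hx.symm] at hih
        have hcast : (r t : Int) - 1 = ((r t - 1 : Nat) : Int) := by omega
        rw [hcast, hih]
        simp
      · have hr0 : r x = 0 := by omega
        have hcond : ¬ (x = t ∧ ((r t : Int)) ≠ 0) := by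
          intro h
          apply h.2
          rw [← hx, hr0]; simp
        rw [if_neg hcond, if_neg hq]
        have h1 : ∀ v, v < t → r v = xs.count v := by
          intro v hv
          rw [hlt v hv]; simp [show ¬ x = v by omega]
        exact ih out r h1 hgt
    · -- t < x : skipped by both (budget of x is 0)
      have hrx : r x = 0 := hgt x hx
      have hcond : ¬ (x = t ∧ ((r t : Int)) ≠ 0) := by
        intro h; omega
      rw [if_neg (show ¬ x < t by omega), if_neg hcond, if_neg (show ¬ 0 < r x by omega)]
      have h1 : ∀ v, v < t → r v = xs.count v := by
        intro v hv
        rw [hlt v hv]; simp [show ¬ x = v by omega]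
      exact ih out r h1 hgt

lemma specGo_zero (l : List Int) : specGo (fun _ => 0) l = [] := by
  induction l with
  | nil => rfl
  | cons x xs ih => simpa [specGo] using ih

lemma a_eq_specGo (arr : List Int) (n : Int) :
    first_n_smallest arr n =
      specGo (fun v => List.count v ((PySem.List.sorted arr (fun x => x)).take n.toNat)) arr := by
  unfold first_n_smallest
  rw [loopA_eq arr [] (PySem.Dict.counter ((PySem.List.sorted arr (fun x => x)).take n.toNat))
      (fun v => List.count v ((PySem.List.sorted arr (fun x => x)).take n.toNat))
      (fun v => PySem.Dict.getD_counter _ v)]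
  simp

lemma b_eq_specGo (arr : List Int) (n : Int) :
    first_n_smallest_alt arr n =
      specGo (fun v => List.count v ((PySem.List.sorted arr (fun x => x)).take n.toNat)) arr := by
  have hlen : 0 ≤ (arr.length : Int) := by positivity
  by_cases hk : min (max n 0) (arr.length : Int) = 0
  · -- degenerate: n ≤ 0 or arr = []
    have hB : first_n_smallest_alt arr n = [] := by
      unfold first_n_smallest_alt
      rw [if_pos hk]
    rw [hB]
    rcases (by omega : n ≤ 0 ∨ (arr.length : Int) = 0) with h | h
    · have hz : (fun v => List.count v ((PySem.List.sorted arr (fun x => x)).take n.toNat)) = fun _ => 0 := by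
        funext v
        simp [Int.toNat_of_nonpos h]
      rw [hz, specGo_zero]
    · have harr : arr = [] := by
        cases arr with
        | nil => rfl
        | cons a l => exfalso; simp at h; omega
      subst harr
      rfl
  · -- main case: 1 ≤ k ≤ len arr
    have hk1 : 1 ≤ min (max n 0) (arr.length : Int) := by omega
    have hkle : min (max n 0) (arr.length : Int) ≤ (arr.length : Int) := min_le_right _ _
    set s : List Int := PySem.List.sorted arr (fun x => x) with hs
    set k : Int := min (max n 0) (arr.length : Int) with hkdef
    have hslen : s.length = arr.length := PySem.List.length_sorted _ _ _
    have hidx : k - 1 < (s.length : Int) := by rw [hslen]; omega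
    have hget : PySem.List.pyGet? s (k - 1) = some (s[(k-1).toNat]'(by omega)) :=
      PySem.List.pyGet?_eq_some_getElem s (by omega) hidx
    set t : Int := s[(k-1).toNat]'(by omega) with ht
    -- the two takes agree
    have htake : s.take n.toNat = s.take k.toNat := by
      rw [List.take_eq_take_min, show min n.toNat s.length = k.toNat by omega]
    -- everything after position k in s is ≥ t, everything up to it is ≤ t
    have hpw : (s.take k.toNat ++ s.drop k.toNat).Pairwise (· ≤ ·) := by
      rw [List.take_append_drop]
      exact PySem.List.sorted_pairwise arr (fun x => x)
    have htmem : t ∈ s.take k.toNat := by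
      have h1 : (k-1).toNat < (s.take k.toNat).length := by
        simp only [List.length_take]
        omega
      have h2 : (s.take k.toNat)[(k-1).toNat]'h1 = t := List.getElem_take
      exact h2 ▸ List.getElem_mem h1
    have hlt : ∀ v, v < t → List.count v (s.take n.toNat) = arr.count v := by
      intro v hv
      have hdrop : List.count v (s.drop k.toNat) = 0 := by
        rw [List.count_eq_zero]
        intro hmem
        have := (List.pairwise_append.mp hpw).2.2 t htmem v hmem
        omega
      calc List.count v (s.take n.toNat)
          = List.count v (s.take k.toNat) + List.count v (s.drop k.toNat) := by rw [htake, hdrop]; omega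
        _ = List.count v s := by rw [← List.count_append, List.take_append_drop]
        _ = List.count v arr := (PySem.List.sorted_perm arr (fun x => x) false).count_eq v
    have hgt : ∀ v, t < v → List.count v (s.take n.toNat) = 0 := by
      intro v hv
      rw [htake, List.count_eq_zero]
      intro hmem
      obtain ⟨i, hi, hy⟩ := List.mem_iff_getElem.mp hmem
      have hi' : i < k.toNat := by
        simp only [List.length_take] at hi
        omega
      have hile : i < s.length := by omega
      have hvs : v = s[i]'hile := by rw [← hy, List.getElem_take]
      have hmono : s[i]'hile ≤ t := by
        rw [ht]
        exact PySem.List.sorted_id_getElem_mono arr (by omega) (by rw [PySem.List.length_sorted]; omega)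
      rw [← hvs] at hmono
      omega
    -- unfold B and reduce it to the reference scan
    simp only [first_n_smallest_alt]
    rw [← hkdef, ← hs, if_neg hk, hget]
    simp only []
    rw [PySem.List.count_eq, PySem.List.slice_to s (by omega), ← htake]
    have hloop := loopB_eq t arr [] (fun v => List.count v (s.take n.toNat)) hlt hgt
    simp only [] at hloop
    rw [hloop]
    simp

-- ===== VERDICT (by name: the statement is the Claim_ definition above) =====
theorem first_n_smallest_spec : Claim_equal_first_n_smallest := by
  unfold Claim_equal_first_n_smallest
  intro arr n _
  unfold Spec_first_n_smallest
  rw [a_eq_specGo, b_eq_specGo]
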